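-- pv_equiv track=rewrite | github.com/Anionex/banana-slides | backend/services/tts_video_service.py | _escape_ffmpeg_filter_value
-- ===== SOURCE A (Python) =====
-- def _escape_ffmpeg_filter_value(value: str) -> str:
--     """转义 FFmpeg filter 参数值，避免路径被误解析为额外选项。"""
--     escaped = value.replace('\\', '/')
--     for old, new in (
--         (':', '\\:'),
--         ("'", "\\'"),
--         (',', '\\,'),
--         ('[', '\\['),
--         (']', '\\]'),
--         (';', '\\;'),
--     ):
--         escaped = escaped.replace(old, new)
--     return escaped
-- ===== SOURCE B (Python) =====
-- def _escape_ffmpeg_filter_value(value: str) -> str: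
--     """Escape FFmpeg filter parameter values in a single table-driven pass."""
--     table = {
--         '\\': '/',
--         ':': '\\:',
--         "'": "\\'",
--         ',': '\\,',
--         '[': '\\[',
--         ']': '\\]',
--         ';': '\\;',
--     }
--     out = []
--     for ch in value:
--         out.append(table.get(ch, ch))
--     return ''.join(out)
-- ===== Notes on version B (the rewrite author's own statement) =====
-- stated objective: idiomatic
-- what changed: Replaces A's seven sequential str.replace passes over the string with a single table-driven pass that appends each character's mapped replacement (dict lookup with fallback) and joins once.
import Mathlib
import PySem

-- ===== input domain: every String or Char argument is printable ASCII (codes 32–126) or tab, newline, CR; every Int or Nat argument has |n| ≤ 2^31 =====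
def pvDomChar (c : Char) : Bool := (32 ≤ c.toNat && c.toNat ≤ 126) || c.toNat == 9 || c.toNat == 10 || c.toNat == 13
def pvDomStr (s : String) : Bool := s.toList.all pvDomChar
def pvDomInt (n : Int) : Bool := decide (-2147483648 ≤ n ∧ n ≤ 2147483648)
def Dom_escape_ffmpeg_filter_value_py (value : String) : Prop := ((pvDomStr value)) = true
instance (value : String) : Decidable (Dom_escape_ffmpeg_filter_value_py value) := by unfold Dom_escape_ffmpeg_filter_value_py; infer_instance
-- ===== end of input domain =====

-- B replaces A's seven sequential str.replace passes by one table-driven pass (simpler/alternative; same cost class).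

-- ===== PORT A =====
def escape_ffmpeg_filter_value_py (value : String) : String :=
  let escaped := PySem.Str.replace value "\\" "/"
  let pairs : List (String × String) :=
    [(":", "\\:"), ("'", "\\'"), (",", "\\,"), ("[", "\\["), ("]", "\\]"), (";", "\\;")]
  pairs.foldl (fun escaped p => PySem.Str.replace escaped p.1 p.2) escaped

-- ===== PORT B =====
def pvEscTable : PySem.Dict Char String :=
  (((((((PySem.Dict.empty).insert '\\' "/").insert ':' "\\:").insert '\'' "\\'").insert
      ',' "\\,").insert '[' "\\[").insert ']' "\\]").insert ';' "\\;"

def escape_ffmpeg_filter_value_py_alt (value : String) : String :=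
  let parts := value.toList.foldl
    (fun out ch => out ++ [(pvEscTable.get? ch).getD (String.ofList [ch])]) []
  PySem.Str.join "" parts

-- ===== PRECONDITION & SPEC =====
def Spec_escape_ffmpeg_filter_value_py (value : String) (out : String) : Prop := out = escape_ffmpeg_filter_value_py_alt value
instance (value : String) (out : String) : Decidable (Spec_escape_ffmpeg_filter_value_py value out) := by unfold Spec_escape_ffmpeg_filter_value_py; infer_instance

-- ===== CLAIM (what is proved, stated in full; the proofs are below) =====
def Claim_equal_escape_ffmpeg_filter_value_py : Prop := ∀ (value : String), Dom_escape_ffmpeg_filter_value_py value → Spec_escape_ffmpeg_filter_value_py value (escape_ffmpeg_filter_value_py value)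

-- ===== LEMMAS AND PROOFS =====

-- single-character replace is a flatMap over the characters
theorem replace_go_single (o : Char) (new : List Char) :
    ∀ (cs acc : List Char) (fuel : Nat), cs.length ≤ fuel →
      PySem.Chars.replace.go [o] new fuel cs acc
        = acc.reverse ++ cs.flatMap (fun c => if c = o then new else [c]) := by
  intro cs
  induction cs with
  | nil =>
      intro acc fuel _
      cases fuel <;> simp [PySem.Chars.replace.go]
  | cons c t ih =>
      intro acc fuel hf
      cases fuel with
      | zero => simp at hf
      | succ fuel =>
        by_cases hc : c = o
        · subst hc
          have : List.isPrefixOf [c] (c :: t) = true := by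
            simp [List.isPrefixOf]
          simp only [PySem.Chars.replace.go, this, if_pos]
          have hd : List.drop [c].length (c :: t) = t := rfl
          rw [hd, ih (new.reverse ++ acc) fuel (by simpa using Nat.le_of_succ_le_succ hf)]
          simp
        · simp only [PySem.Chars.replace.go]
          rw [if_neg (by simp [List.isPrefixOf]; exact Ne.symm hc)]
          rw [ih (c :: acc) fuel (by simpa using Nat.le_of_succ_le_succ hf)]
          simp [hc]

theorem replace_single (cs : List Char) (o : Char) (new : List Char) :
    PySem.Chars.replace cs [o] new = cs.flatMap (fun c => if c = o then new else [c]) := by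
  simp only [PySem.Chars.replace, List.isEmpty]
  rw [if_neg (by simp)]
  simpa using replace_go_single o new cs [] cs.length le_rfl

-- the composed per-character map of A's seven passes
def pvMapA (c : Char) : List Char :=
  (if c = '\\' then ['/'] else [c]).flatMap fun c =>
  (if c = ':' then ['\\', ':'] else [c]).flatMap fun c =>
  (if c = '\'' then ['\\', '\''] else [c]).flatMap fun c =>
  (if c = ',' then ['\\', ','] else [c]).flatMap fun c =>
  (if c = '[' then ['\\', '['] else [c]).flatMap fun c =>
  (if c = ']' then ['\\', ']'] else [c]).flatMap fun c =>
  if c = ';' then ['\\', ';'] else [c]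

theorem replace_str (s : String) (o : String) (n : String) (c : Char) (h : o.toList = [c]) :
    PySem.Str.replace s o n
      = String.ofList (s.toList.flatMap (fun x => if x = c then n.toList else [x])) := by
  simp [PySem.Str.replace, h, replace_single]

theorem portA_eq_flatMap (value : String) :
    escape_ffmpeg_filter_value_py value = String.ofList (value.toList.flatMap pvMapA) := by
  simp only [escape_ffmpeg_filter_value_py, List.foldl_cons, List.foldl_nil]
  rw [replace_str _ _ _ ';' (by decide), replace_str _ _ _ ']' (by decide),
    replace_str _ _ _ '[' (by decide), replace_str _ _ _ ',' (by decide),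
    replace_str _ _ _ '\'' (by decide), replace_str _ _ _ ':' (by decide),
    replace_str _ _ _ '\\' (by decide)]
  simp only [String.toList_ofList, List.flatMap_assoc,
    show ("/" : String).toList = ['/'] from rfl,
    show ("\\:" : String).toList = ['\\', ':'] from rfl,
    show ("\\'" : String).toList = ['\\', '\''] from rfl,
    show ("\\," : String).toList = ['\\', ','] from rfl,
    show ("\\[" : String).toList = ['\\', '['] from rfl,
    show ("\\]" : String).toList = ['\\', ']'] from rfl,
    show ("\\;" : String).toList = ['\\', ';'] from rfl]
  rfl

-- B's per-character table lookup, as a char-list map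
def pvMapB (c : Char) : List Char :=
  ((pvEscTable.get? c).getD (String.ofList [c])).toList

theorem mapA_eq_mapB (c : Char) : pvMapA c = pvMapB c := by
  by_cases h1 : c = '\\'; · subst h1; decide
  by_cases h2 : c = ':'; · subst h2; decide
  by_cases h3 : c = '\''; · subst h3; decide
  by_cases h4 : c = ','; · subst h4; decide
  by_cases h5 : c = '['; · subst h5; decide
  by_cases h6 : c = ']'; · subst h6; decide
  by_cases h7 : c = ';'; · subst h7; decide
  have e1 : ('\\' == c) = false := by simp; exact Ne.symm h1
  have e2 : ((':' : Char) == c) = false := by simp; exact Ne.symm h2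
  have e3 : (('\'' : Char) == c) = false := by simp; exact Ne.symm h3
  have e4 : ((',' : Char) == c) = false := by simp; exact Ne.symm h4
  have e5 : (('[' : Char) == c) = false := by simp; exact Ne.symm h5
  have e6 : ((']' : Char) == c) = false := by simp; exact Ne.symm h6
  have e7 : ((';' : Char) == c) = false := by simp; exact Ne.symm h7
  simp [pvMapA, pvMapB, h1, h2, h3, h4, h5, h6, h7, pvEscTable,
    PySem.Dict.get?, PySem.Dict.insert, PySem.Dict.empty, List.find?, e1, e2, e3, e4, e5, e6, e7]

theorem foldl_append_map {α β : Type} (f : α → β) :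
    ∀ (l : List α) (acc : List β),
      l.foldl (fun out x => out ++ [f x]) acc = acc ++ l.map f := by
  intro l
  induction l with
  | nil => simp
  | cons x t ih => intro acc; simp [List.foldl, ih]

theorem join_empty_sep (l : List (List Char)) :
    PySem.Chars.join [] l = l.flatten := by
  induction l with
  | nil => simp [PySem.Chars.join, List.intercalate]
  | cons a t ih =>
    cases t with
    | nil => simp [PySem.Chars.join, List.intercalate]
    | cons b u =>
      rw [PySem.Chars.join_cons_cons, ih]
      simp

theorem portB_eq_flatMap (value : String) :
    escape_ffmpeg_filter_value_py_alt value = String.ofList (value.toList.flatMap pvMapB) := by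
  simp only [escape_ffmpeg_filter_value_py_alt]
  rw [foldl_append_map]
  simp only [List.nil_append, PySem.Str.join]
  congr 1
  rw [show ("" : String).toList = [] from rfl]
  rw [show (value.toList.map fun ch => (pvEscTable.get? ch).getD (String.ofList [ch])).map String.toList
        = value.toList.map pvMapB by simp [pvMapB]]
  rw [join_empty_sep]
  simp [List.flatMap_def]

-- ===== VERDICT (by name: the statement is the Claim_ definition above) =====
theorem escape_ffmpeg_filter_value_py_spec : Claim_equal_escape_ffmpeg_filter_value_py := by
  intro value _
  unfold Spec_escape_ffmpeg_filter_value_py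
  rw [portA_eq_flatMap, portB_eq_flatMap]
  congr 1
  exact List.flatMap_congr (fun c _ => mapA_eq_mapB c)
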